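-- pv_equiv track=rewrite | github.com/hvbhanot/ProfessorTux | app/professor.py | _split_mode_prompt
-- ===== SOURCE A (Python) =====
-- def _split_mode_prompt(prompt: str) -> tuple[str, list[dict]]:
--     """Split a mode prompt body into rule text and **Student:**/**Response:** few-shot pairs."""
--     examples = []
--     rule_lines = []
--     lines = prompt.split("\n")
--
--     i = 0
--     in_examples = False
--     while i < len(lines):
--         line = lines[i].strip()
--
--         if line.lower().startswith("## example") or line.lower().startswith("## response"):
--             in_examples = True
--             i += 1
--             continue
--
--         if in_examples and line.startswith("**Student:**"):
--             student_text = line.replace("**Student:**", "").strip().strip('"')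
--             response_lines = []
--             i += 1
--             while i < len(lines):
--                 rline = lines[i].strip()
--                 if rline.startswith("---") or rline.startswith("**Student:**"):
--                     break
--                 if rline and not rline.startswith("**Response:**"):
--                     response_lines.append(rline)
--                 i += 1
--             if student_text and response_lines:
--                 examples.append({
--                     "student": student_text,
--                     "response": "\n".join(response_lines),
--                 })
--             continue
--
--         if not in_examples and line and not line.startswith("#") and not line.startswith("---"):
--             rule_lines.append(line)
--
--         i += 1
--
--     rules = " ".join(rule_lines)
--     # Small models do better with short rules; cap at ~500 chars.
--     if len(rules) > 500:
--         rules = rules[:497] + "..."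
--
--     return rules, examples
-- ===== SOURCE B (Python) =====
-- def _split_mode_prompt(prompt: str) -> tuple[str, list[dict]]:
--     """Flat single-pass state machine: explicit collecting state instead of a nested index loop."""
--     examples = []
--     rule_lines = []
--     in_examples = False
--     student_text = None      # None = not collecting a response
--     response_lines = []
--
--     for raw in prompt.split("\n"):
--         line = raw.strip()
--
--         if student_text is not None:
--             if line.startswith("---") or line.startswith("**Student:**"):
--                 # end of the current example: flush it, then fall through to
--                 # re-process this line in normal mode
--                 if student_text and response_lines:
--                     examples.append({"student": student_text,
--                                      "response": "\n".join(response_lines)})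
--                 student_text = None
--                 response_lines = []
--             else:
--                 if line and not line.startswith("**Response:**"):
--                     response_lines.append(line)
--                 continue
--
--         low = line.lower()
--         if low.startswith("## example") or low.startswith("## response"):
--             in_examples = True
--             continue
--
--         if in_examples and line.startswith("**Student:**"):
--             student_text = line.replace("**Student:**", "").strip().strip('"')
--             response_lines = []
--             continue
--
--         if not in_examples and line and not line.startswith("#") and not line.startswith("---"):
--             rule_lines.append(line)
--
--     if student_text is not None and student_text and response_lines:
--         examples.append({"student": student_text,
--                          "response": "\n".join(response_lines)})
--
--     rules = " ".join(rule_lines)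
--     if len(rules) > 500:
--         rules = rules[:497] + "..."
--     return rules, examples
-- ===== Notes on version B (the rewrite author's own statement) =====
-- stated objective: alternative
-- what changed: A's nested index-driven while loops (an inner loop that consumes response lines and an outer loop that resumes at the returned index) are replaced by a single flat fold over the lines with an explicit collecting state (current student/response accumulators, flushed on '---'/'**Student:**' and at end of input).
import Mathlib
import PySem

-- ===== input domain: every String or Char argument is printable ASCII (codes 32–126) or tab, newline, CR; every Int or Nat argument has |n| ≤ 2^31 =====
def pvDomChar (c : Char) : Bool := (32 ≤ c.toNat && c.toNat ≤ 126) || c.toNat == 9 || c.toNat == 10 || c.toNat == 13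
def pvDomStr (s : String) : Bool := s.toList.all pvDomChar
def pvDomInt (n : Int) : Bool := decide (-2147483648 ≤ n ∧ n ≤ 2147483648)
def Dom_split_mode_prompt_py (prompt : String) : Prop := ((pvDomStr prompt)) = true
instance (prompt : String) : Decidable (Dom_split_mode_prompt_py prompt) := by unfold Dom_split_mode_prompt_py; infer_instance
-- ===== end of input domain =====

-- B replaces A's nested index-driven while loops by a single flat fold over the lines with an
-- explicit `collecting` state (objective: alternative decomposition; same O(n) cost).

-- ===== PORT A =====
-- A's inner `while` loop: collect response lines, return (response_lines, remaining raw lines)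
def pvRespLoopA : List String → List String → List String × List String
  | [], acc => (acc, [])
  | l :: rest, acc =>
    let rline := PySem.Str.strip l
    if PySem.Str.startswith rline "---" || PySem.Str.startswith rline "**Student:**" then
      (acc, l :: rest)
    else if !(rline == "") && !PySem.Str.startswith rline "**Response:**" then
      pvRespLoopA rest (acc ++ [rline])
    else
      pvRespLoopA rest acc

-- needed by pvOuterA's termination: the inner loop only consumes lines
lemma pvRespLoopA_len (lines : List String) (acc : List String) :
    (pvRespLoopA lines acc).2.length ≤ lines.length := by
  induction lines generalizing acc with
  | nil => simp [pvRespLoopA]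
  | cons l rest ih =>
    simp only [pvRespLoopA]
    split
    · simp
    · split
      · exact (ih _).trans (Nat.le_succ _)
      · exact (ih _).trans (Nat.le_succ _)

-- A's outer `while` loop
def pvOuterA (lines : List String) (inEx : Bool) (rules : List String)
    (exs : List (List (String × String))) : List String × List (List (String × String)) :=
  match lines with
  | [] => (rules, exs)
  | l :: rest =>
    let line := PySem.Str.strip l
    if PySem.Str.startswith (PySem.Str.lower line) "## example"
        || PySem.Str.startswith (PySem.Str.lower line) "## response" then
      pvOuterA rest true rules exs
    else if inEx && PySem.Str.startswith line "**Student:**" then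
      let student := PySem.Str.stripChars
        (PySem.Str.strip (PySem.Str.replace line "**Student:**" "")) "\""
      let p := pvRespLoopA rest []
      let exs' := if !(student == "") && !(p.1 == ([] : List String)) then
          exs ++ [[("student", student), ("response", PySem.Str.join "\n" p.1)]]
        else exs
      pvOuterA p.2 inEx rules exs'
    else if !inEx && !(line == "") && !PySem.Str.startswith line "#"
        && !PySem.Str.startswith line "---" then
      pvOuterA rest inEx (rules ++ [line]) exs
    else
      pvOuterA rest inEx rules exs
termination_by lines.length
decreasing_by
  · simp
  · have := pvRespLoopA_len rest []
    simp only [List.length_cons]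
    omega
  · simp
  · simp

def split_mode_prompt_py (prompt : String) : String × (List (List (String × String))) :=
  let lines := (PySem.Str.split? prompt "\n").getD []   -- sep "\n" ≠ "": split? is `some` here
  let p := pvOuterA lines false [] []
  let rules := PySem.Str.join " " p.1
  let rules := if PySem.Str.len rules > 500
    then PySem.Str.slice rules none (some 497) ++ "..." else rules
  (rules, p.2)

-- ===== PORT B =====
structure PVSt where
  inEx : Bool
  cur : Option (String × List String)  -- some (student_text, response_lines) = collecting
  rules : List String
  exs : List (List (String × String))

-- flush the pending example (if both parts are non-empty)
def pvFlushB (st : PVSt) : PVSt :=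
  match st.cur with
  | none => st
  | some (stu, resp) =>
    { st with
      cur := none
      exs := if !(stu == "") && !(resp == ([] : List String)) then
          st.exs ++ [[("student", stu), ("response", PySem.Str.join "\n" resp)]]
        else st.exs }

-- the non-collecting part of the loop body (line already stripped)
def pvNormB (st : PVSt) (line : String) : PVSt :=
  let low := PySem.Str.lower line
  if PySem.Str.startswith low "## example" || PySem.Str.startswith low "## response" then
    { st with inEx := true }
  else if st.inEx && PySem.Str.startswith line "**Student:**" then
    { st with cur := some (PySem.Str.stripChars
        (PySem.Str.strip (PySem.Str.replace line "**Student:**" "")) "\"", ([] : List String)) }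
  else if !st.inEx && !(line == "") && !PySem.Str.startswith line "#"
      && !PySem.Str.startswith line "---" then
    { st with rules := st.rules ++ [line] }
  else st

-- one iteration of B's single flat loop
def pvStepB (st : PVSt) (raw : String) : PVSt :=
  let line := PySem.Str.strip raw
  match st.cur with
  | some (stu, resp) =>
    if PySem.Str.startswith line "---" || PySem.Str.startswith line "**Student:**" then
      pvNormB (pvFlushB st) line
    else if !(line == "") && !PySem.Str.startswith line "**Response:**" then
      { st with cur := some (stu, resp ++ [line]) }
    else st
  | none => pvNormB st line

def split_mode_prompt_py_alt (prompt : String) : String × (List (List (String × String))) :=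
  let lines := (PySem.Str.split? prompt "\n").getD []   -- sep "\n" ≠ "": split? is `some` here
  let st := pvFlushB (lines.foldl pvStepB ⟨false, none, [], []⟩)
  let rules := PySem.Str.join " " st.rules
  let rules := if PySem.Str.len rules > 500
    then PySem.Str.slice rules none (some 497) ++ "..." else rules
  (rules, st.exs)

-- ===== PRECONDITION & SPEC =====
def Spec_split_mode_prompt_py (prompt : String) (out : String × (List (List (String × String)))) : Prop := out = split_mode_prompt_py_alt prompt
instance (prompt : String) (out : String × (List (List (String × String)))) : Decidable (Spec_split_mode_prompt_py prompt out) := by unfold Spec_split_mode_prompt_py; infer_instance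

-- ===== CLAIM (what is proved, stated in full; the proofs are below) =====
def Claim_equal_split_mode_prompt_py : Prop := ∀ (prompt : String), Dom_split_mode_prompt_py prompt → Spec_split_mode_prompt_py prompt (split_mode_prompt_py prompt)

-- ===== LEMMAS AND PROOFS =====

-- abbreviations for the proof only
def pvOutB (st : PVSt) : List String × List (List (String × String)) :=
  (st.rules, (pvFlushB st).exs)

def pvMkExs (stu : String) (acc : List String) (exs : List (List (String × String))) :
    List (List (String × String)) :=
  if !(stu == "") && !(acc == ([] : List String)) then
    exs ++ [[("student", stu), ("response", PySem.Str.join "\n" acc)]]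
  else exs

lemma pvFlushB_rules (st : PVSt) : (pvFlushB st).rules = st.rules := by
  cases st with
  | mk inEx cur rules exs => cases cur with
    | none => rfl
    | some p => cases p; rfl

-- the key simulation lemma: A's nested loops compute what B's flat fold computes,
-- both from a non-collecting state (part 1) and from a collecting state (part 2)
lemma pvMain : ∀ (n : ℕ) (lines : List String), lines.length = n →
    (∀ (inEx : Bool) (rules : List String) (exs : List (List (String × String))),
      pvOuterA lines inEx rules exs = pvOutB (lines.foldl pvStepB ⟨inEx, none, rules, exs⟩))
  ∧ (∀ (stu : String) (resp rules : List String) (exs : List (List (String × String))),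
      pvOutB (lines.foldl pvStepB ⟨true, some (stu, resp), rules, exs⟩)
        = pvOuterA (pvRespLoopA lines resp).2 true rules
            (pvMkExs stu (pvRespLoopA lines resp).1 exs)) := by
  intro n
  induction n using Nat.strong_induction_on with
  | _ n ih =>
    intro lines hlen
    cases lines with
    | nil =>
      constructor
      · intro inEx rules exs
        simp [pvOuterA, pvOutB, pvFlushB]
      · intro stu resp rules exs
        simp only [List.foldl_nil, pvRespLoopA, pvOuterA, pvOutB, pvFlushB, pvMkExs]
    | cons l rest =>
      have hrest : rest.length < n := by simp at hlen; omega
      constructor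
      · -- part 1: non-collecting state
        intro inEx rules exs
        rw [pvOuterA]
        simp only [List.foldl_cons, pvStepB, pvNormB]
        split
        · -- header line
          exact (ih _ hrest rest rfl).1 true rules exs
        · split
          · -- **Student:** while in_examples
            rename_i h1 h2
            have hEx : inEx = true := by
              cases inEx <;> simp_all
            subst hEx
            have := (ih _ hrest rest rfl).2
              (PySem.Str.stripChars
                (PySem.Str.strip (PySem.Str.replace (PySem.Str.strip l) "**Student:**" "")) "\"")
              [] rules exs
            rw [this]
            simp [pvMkExs]
          · split
            · -- rule line
              exact (ih _ hrest rest rfl).1 inEx (rules ++ [PySem.Str.strip l]) exs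
            · -- skipped line
              exact (ih _ hrest rest rfl).1 inEx rules exs
      · -- part 2: collecting state
        intro stu resp rules exs
        simp only [List.foldl_cons, pvStepB]
        split
        · -- break line: A leaves the inner loop and re-processes l in the outer loop
          rename_i hbrk
          rw [pvRespLoopA]
          simp only [hbrk, if_true]
          rw [pvOuterA]
          simp only [pvFlushB, pvNormB]
          split
          · -- (header: both sides set in_examples and drop the line)
            exact ((ih _ hrest rest rfl).1 true rules (pvMkExs stu resp exs)).symm
          · split
            · -- new **Student:** line: both start a fresh example
              exact (ih _ hrest rest rfl).2
                (PySem.Str.stripChars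
                  (PySem.Str.strip (PySem.Str.replace (PySem.Str.strip l) "**Student:**" "")) "\"")
                [] rules (pvMkExs stu resp exs)
            · split
              · -- (rule line: unreachable here, but both sides do the same thing)
                rename_i h3
                simp at h3
              · exact ((ih _ hrest rest rfl).1 true rules (pvMkExs stu resp exs)).symm
        · -- not a break line
          rename_i hbrk
          rw [pvRespLoopA]
          simp only [Bool.not_eq_true] at hbrk
          simp only [hbrk]
          split
          · -- response line appended on both sides
            exact (ih _ hrest rest rfl).2 stu (resp ++ [PySem.Str.strip l]) rules exs
          · -- blank / **Response:** line skipped on both sides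
            exact (ih _ hrest rest rfl).2 stu resp rules exs

-- ===== VERDICT (by name: the statement is the Claim_ definition above) =====
theorem split_mode_prompt_py_spec : Claim_equal_split_mode_prompt_py := by
  intro prompt _
  show split_mode_prompt_py prompt = split_mode_prompt_py_alt prompt
  have h := (pvMain _ ((PySem.Str.split? prompt "\n").getD []) rfl).1 false [] []
  simp only [split_mode_prompt_py, split_mode_prompt_py_alt, h, pvOutB, pvFlushB_rules]
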